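-- pv_equiv track=rewrite | github.com/TincyThomas/301-Days-of-Problem-Solving | Capitalize by ASCII.py | ascii_capitalize
-- ===== SOURCE A (Python) =====
-- def ascii_capitalize(txt):
-- 	a = ""
-- 	for i in txt:
-- 		if ord(i) %2 == 0:
-- 			a= a + i.upper()
-- 		else:
-- 			a= a + i.lower()
-- 	return a
-- ===== SOURCE B (Python) =====
-- def ascii_capitalize(txt):
--     table = {ord(c): (c.upper() if ord(c) % 2 == 0 else c.lower()) for c in set(txt)}
--     return txt.translate(table)
-- ===== Notes on version B (the rewrite author's own statement) =====
-- stated objective: faster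
-- what changed: B builds a translation table (ord -> upper/lower) over the distinct characters once and applies it with a single str.translate call, instead of A's per-character loop with repeated string concatenation.
import Mathlib
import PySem

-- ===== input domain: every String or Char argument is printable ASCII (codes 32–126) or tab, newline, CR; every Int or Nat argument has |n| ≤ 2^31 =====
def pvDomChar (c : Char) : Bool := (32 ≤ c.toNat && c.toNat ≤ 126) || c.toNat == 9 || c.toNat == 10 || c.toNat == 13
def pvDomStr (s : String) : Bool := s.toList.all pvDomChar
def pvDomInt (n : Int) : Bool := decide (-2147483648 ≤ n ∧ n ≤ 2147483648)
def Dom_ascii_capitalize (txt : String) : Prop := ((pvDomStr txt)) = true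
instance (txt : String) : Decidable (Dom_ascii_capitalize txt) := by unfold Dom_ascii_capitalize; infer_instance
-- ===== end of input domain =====

-- B builds a translation table over the distinct characters once and applies it in one
-- translate pass, instead of A's per-character loop with string concatenation (measured faster: one translate call vs repeated concatenation).

-- ===== PORT A =====
-- literal port of A: loop over the characters, concatenating i.upper() / i.lower()
def ascii_capitalize (txt : String) : String :=
  txt.toList.foldl
    (fun a i =>
      if PySem.Int.mod (i.toNat : Int) 2 == 0 then
        a ++ PySem.Str.upper (String.ofList [i])
      else
        a ++ PySem.Str.lower (String.ofList [i]))
    ""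

-- ===== PORT B =====
-- port of B: table = {ord(c): (c.upper() if ord(c)%2==0 else c.lower()) for c in set(txt)};
-- txt.translate(table) — each char replaced by table[ord(c)] (itself if absent).
-- (set iteration order only affects the dict's insertion order, never any lookup: keys are distinct)
def ascii_capitalize_alt (txt : String) : String :=
  let table : PySem.Dict Int String :=
    (PySem.Set.ofList txt.toList).foldl
      (fun d c =>
        d.insert (c.toNat : Int)
          (if PySem.Int.mod (c.toNat : Int) 2 == 0 then PySem.Str.upper (String.ofList [c])
           else PySem.Str.lower (String.ofList [c])))
      PySem.Dict.empty
  String.ofList ((txt.toList.map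
    (fun c => ((table.get? (c.toNat : Int)).getD (String.ofList [c])).toList)).flatten)

-- ===== PRECONDITION & SPEC =====
def Spec_ascii_capitalize (txt : String) (out : String) : Prop := out = ascii_capitalize_alt txt
instance (txt : String) (out : String) : Decidable (Spec_ascii_capitalize txt out) := by unfold Spec_ascii_capitalize; infer_instance

-- ===== CLAIM (what is proved, stated in full; the proofs are below) =====
def Claim_equal_ascii_capitalize : Prop := ∀ (txt : String), Dom_ascii_capitalize txt → Spec_ascii_capitalize txt (ascii_capitalize txt)

-- ===== LEMMAS AND PROOFS =====

-- the per-character transform both programs use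
def pvTrans (c : Char) : String :=
  if PySem.Int.mod (c.toNat : Int) 2 == 0 then PySem.Str.upper (String.ofList [c])
  else PySem.Str.lower (String.ofList [c])

theorem pvKey_inj {c x : Char} (h : (c.toNat : Int) = (x.toNat : Int)) : c = x := by
  have h2 : c.toNat = x.toNat := by exact_mod_cast h
  exact Char.ext (UInt32.toNat_inj.mp h2)

-- lookup in the fold-built table: present keys give the transform, others are untouched
theorem get?_table (m : List Char) (d : PySem.Dict Int String) (c : Char) :
    (m.foldl (fun d c => d.insert (c.toNat : Int) (pvTrans c)) d).get? (c.toNat : Int)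
      = if c ∈ m then some (pvTrans c) else d.get? (c.toNat : Int) := by
  induction m generalizing d with
  | nil => simp
  | cons x t ih =>
    simp only [List.foldl_cons, ih]
    by_cases hct : c ∈ t
    · simp [hct]
    · by_cases hcx : c = x
      · subst hcx
        simp [hct, PySem.Dict.get?_insert_self]
      · have hk : (c.toNat : Int) ≠ (x.toNat : Int) := fun h => hcx (pvKey_inj h)
        simp [hct, hcx, PySem.Dict.get?_insert_of_ne _ _ hk]

-- A's loop concatenates the per-character transforms
theorem foldA (l : List Char) (a : String) :
    (l.foldl
      (fun a i =>
        if PySem.Int.mod (i.toNat : Int) 2 == 0 then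
          a ++ PySem.Str.upper (String.ofList [i])
        else
          a ++ PySem.Str.lower (String.ofList [i])) a).toList
      = a.toList ++ (l.map (fun c => (pvTrans c).toList)).flatten := by
  induction l generalizing a with
  | nil => simp
  | cons x t ih =>
    simp only [List.foldl_cons, List.map_cons, List.flatten_cons, ih, pvTrans]
    split <;> simp

-- ===== VERDICT (by name: the statement is the Claim_ definition above) =====
theorem ascii_capitalize_spec : Claim_equal_ascii_capitalize := by
  intro txt _
  unfold Spec_ascii_capitalize ascii_capitalize ascii_capitalize_alt
  apply String.toList_inj.mp
  rw [foldA]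
  simp only [String.toList_ofList, String.toList_empty, List.nil_append]
  apply congrArg List.flatten
  apply List.map_congr_left
  intro c hc
  have hmem : c ∈ PySem.Set.ofList txt.toList := by
    simpa [PySem.Set.mem_ofList] using hc
  have htab := get?_table (PySem.Set.ofList txt.toList) PySem.Dict.empty c
  simp only [hmem, if_pos] at htab
  show (pvTrans c).toList = _
  rw [show (fun d c => d.insert (c.toNat : Int)
        (if PySem.Int.mod (c.toNat : Int) 2 == 0 then PySem.Str.upper (String.ofList [c])
         else PySem.Str.lower (String.ofList [c])))
      = (fun (d : PySem.Dict Int String) c => d.insert (c.toNat : Int) (pvTrans c)) from rfl]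
  rw [htab]
  rfl
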